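-- pv_equiv track=rewrite | github.com/FlourishingHumanityCorporation/AutoTaskTracker | tests/health/testing/bug_correlation.py | _classify_bug_type
-- ===== SOURCE A (Python) =====
-- def _classify_bug_type(description: str, diff: str) -> str:
--     """Classify the type of bug based on description and diff."""
--     desc_lower = description.lower()
--     diff_lower = diff.lower()
--
--     # Off-by-one errors
--     if any(pattern in diff for pattern in ['->', '<=', '>=', '==', '!=']):
--         if any(keyword in desc_lower for keyword in ['boundary', 'index', 'range', 'length']):
--             return "off_by_one"
--
--     # Null pointer / None issues
--     if any(keyword in desc_lower for keyword in ['null', 'none', 'undefined', 'attributeerror']):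
--         return "null_pointer"
--
--     # Logic errors
--     if any(pattern in diff_lower for pattern in ['and', 'or', 'not', 'if', 'else']):
--         return "logic_error"
--
--     # Error handling
--     if any(keyword in desc_lower for keyword in ['exception', 'error', 'catch', 'handle']):
--         return "error_handling"
--
--     # Concurrency issues
--     if any(keyword in desc_lower for keyword in ['thread', 'async', 'lock', 'race']):
--         return "concurrency"
--
--     # Configuration/environment issues
--     if any(keyword in desc_lower for keyword in ['config', 'env', 'setting', 'path']):
--         return "configuration"
--
--     # Performance issues
--     if any(keyword in desc_lower for keyword in ['slow', 'performance', 'timeout', 'memory']):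
--         return "performance"
--
--     # Integration issues
--     if any(keyword in desc_lower for keyword in ['api', 'database', 'connection', 'service']):
--         return "integration"
--
--     return "other"
-- ===== SOURCE B (Python) =====
-- # Priority-scan reformulation: instead of an early-return if-cascade over keyword
-- # groups, flatten every (group, keyword) pair into one table with a numeric
-- # priority, scan the whole table once keeping the minimum matching priority,
-- # and map that priority to its label. The off_by_one rule stays a special
-- # two-part check (raw-diff patterns AND description keywords) ahead of the scan.
--
-- OFF_PATTERNS = ('->', '<=', '>=', '==', '!=')
-- OFF_KEYWORDS = ('boundary', 'index', 'range', 'length')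
--
-- # (keywords, search the lowered diff instead of the lowered description?)
-- GROUPS = (
--     (('null', 'none', 'undefined', 'attributeerror'), False),
--     (('and', 'or', 'not', 'if', 'else'), True),
--     (('exception', 'error', 'catch', 'handle'), False),
--     (('thread', 'async', 'lock', 'race'), False),
--     (('config', 'env', 'setting', 'path'), False),
--     (('slow', 'performance', 'timeout', 'memory'), False),
--     (('api', 'database', 'connection', 'service'), False),
-- )
--
-- LABELS = ('off_by_one', 'null_pointer', 'logic_error', 'error_handling',
--           'concurrency', 'configuration', 'performance', 'integration', 'other')
--
-- # keyword-level flat table: (priority, keyword, use_diff)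
-- FLAT = [(prio, kw, use_diff)
--         for prio, (kws, use_diff) in enumerate(GROUPS, 1)
--         for kw in kws]
--
--
-- def _classify_bug_type(description: str, diff: str) -> str:
--     """Classify the type of bug based on description and diff."""
--     desc_lower = description.lower()
--     diff_lower = diff.lower()
--
--     if any(p in diff for p in OFF_PATTERNS) and \
--        any(k in desc_lower for k in OFF_KEYWORDS):
--         return LABELS[0]
--
--     best = 8  # priority of 'other'
--     for prio, kw, use_diff in FLAT:
--         if kw in (diff_lower if use_diff else desc_lower):
--             best = min(best, prio)
--     return LABELS[best]
-- ===== Notes on version B (the rewrite author's own statement) =====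
-- stated objective: alternative
-- what changed: Replaced the early-return if-cascade over keyword groups by a flattened (priority, keyword, which-text) table scanned in one full pass that keeps the minimum matching priority and maps it to a label; only the two-part off_by_one rule stays a special check.
import Mathlib
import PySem

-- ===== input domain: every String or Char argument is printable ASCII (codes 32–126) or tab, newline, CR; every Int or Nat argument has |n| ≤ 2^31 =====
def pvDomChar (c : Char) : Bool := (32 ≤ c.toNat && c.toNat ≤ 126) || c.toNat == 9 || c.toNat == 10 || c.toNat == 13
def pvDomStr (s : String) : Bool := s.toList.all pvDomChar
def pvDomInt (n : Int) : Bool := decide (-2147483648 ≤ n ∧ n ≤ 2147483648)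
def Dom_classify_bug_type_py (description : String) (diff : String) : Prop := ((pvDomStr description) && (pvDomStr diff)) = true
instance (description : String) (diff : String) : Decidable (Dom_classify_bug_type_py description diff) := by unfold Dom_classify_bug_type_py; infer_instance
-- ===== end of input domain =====

-- B replaces A's early-return if-cascade by a flattened (priority, keyword, which-text) table
-- scanned in one full pass keeping the minimum matching priority, then mapped to a label
-- (alternative decomposition; same cost).


-- ===== PORT A =====
def classify_bug_type_py (description : String) (diff : String) : String :=
  let desc_lower := PySem.Str.lower description
  let diff_lower := PySem.Str.lower diff
  if (["->", "<=", ">=", "==", "!="].any fun p => PySem.Str.isIn p diff) &&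
     (["boundary", "index", "range", "length"].any fun k => PySem.Str.isIn k desc_lower) then
    "off_by_one"
  else if ["null", "none", "undefined", "attributeerror"].any fun k => PySem.Str.isIn k desc_lower then
    "null_pointer"
  else if ["and", "or", "not", "if", "else"].any fun p => PySem.Str.isIn p diff_lower then
    "logic_error"
  else if ["exception", "error", "catch", "handle"].any fun k => PySem.Str.isIn k desc_lower then
    "error_handling"
  else if ["thread", "async", "lock", "race"].any fun k => PySem.Str.isIn k desc_lower then
    "concurrency"
  else if ["config", "env", "setting", "path"].any fun k => PySem.Str.isIn k desc_lower then
    "configuration"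
  else if ["slow", "performance", "timeout", "memory"].any fun k => PySem.Str.isIn k desc_lower then
    "performance"
  else if ["api", "database", "connection", "service"].any fun k => PySem.Str.isIn k desc_lower then
    "integration"
  else
    "other"

-- ===== PORT B =====
-- (keywords, search the lowered diff instead of the lowered description?)
def pvGroups : List (List String × Bool) :=
  [ (["null", "none", "undefined", "attributeerror"], false),
    (["and", "or", "not", "if", "else"], true),
    (["exception", "error", "catch", "handle"], false),
    (["thread", "async", "lock", "race"], false),
    (["config", "env", "setting", "path"], false),
    (["slow", "performance", "timeout", "memory"], false),
    (["api", "database", "connection", "service"], false) ]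

def pvLabels : List String :=
  ["off_by_one", "null_pointer", "logic_error", "error_handling",
   "concurrency", "configuration", "performance", "integration", "other"]

-- keyword-level flat table: (priority, keyword, use_diff); mirrors Source B's FLAT comprehension
def pvFlat : List (Int × String × Bool) :=
  (PySem.List.enumerate pvGroups 1).flatMap (fun g => g.2.1.map (fun k => (g.1, k, g.2.2)))

-- one loop step of Source B: keep the minimum matching priority
def pvStep (desc_lower diff_lower : String) (m : Int) (e : Int × String × Bool) : Int :=
  if PySem.Str.isIn e.2.1 (if e.2.2 then diff_lower else desc_lower) then min m e.1 else m

def classify_bug_type_py_alt (description : String) (diff : String) : String :=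
  let desc_lower := PySem.Str.lower description
  let diff_lower := PySem.Str.lower diff
  if (["->", "<=", ">=", "==", "!="].any fun p => PySem.Str.isIn p diff) &&
     (["boundary", "index", "range", "length"].any fun k => PySem.Str.isIn k desc_lower) then
    (PySem.List.pyGet? pvLabels 0).getD "other"   -- LABELS[0]; index always in range, getD exact
  else
    let best := pvFlat.foldl (pvStep desc_lower diff_lower) 8
    (PySem.List.pyGet? pvLabels best).getD "other" -- LABELS[best]; 1 ≤ best ≤ 8, getD exact

-- ===== PRECONDITION & SPEC =====
def Spec_classify_bug_type_py (description : String) (diff : String) (out : String) : Prop := out = classify_bug_type_py_alt description diff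
instance (description : String) (diff : String) (out : String) : Decidable (Spec_classify_bug_type_py description diff out) := by unfold Spec_classify_bug_type_py; infer_instance

-- ===== CLAIM (what is proved, stated in full; the proofs are below) =====
def Claim_equal_classify_bug_type_py : Prop := ∀ (description : String) (diff : String), Dom_classify_bug_type_py description diff → Spec_classify_bug_type_py description diff (classify_bug_type_py description diff)

-- ===== LEMMAS AND PROOFS =====

-- folding B's min-step over one priority group = group-level any, collapsed to min
theorem pvGrp (dl fl : String) (kws : List String) (p : Int) (u : Bool) (m : Int) :
    List.foldl (pvStep dl fl) m (kws.map (fun k => (p, k, u))) =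
      if kws.any (fun k => PySem.Str.isIn k (if u then fl else dl)) then min m p else m := by
  induction kws generalizing m with
  | nil => simp
  | cons k t ih =>
      simp only [List.map_cons, List.foldl_cons, List.any_cons, pvStep]
      by_cases h : PySem.Str.isIn k (if u then fl else dl) = true
      · simp only [h, if_true, Bool.true_or, ih]
        split_ifs <;> simp
      · simp only [h, ih]
        simp

theorem pvFlat_eq : pvFlat =
    (["null", "none", "undefined", "attributeerror"].map (fun k => ((1:Int), k, false))) ++
    (["and", "or", "not", "if", "else"].map (fun k => ((2:Int), k, true))) ++
    (["exception", "error", "catch", "handle"].map (fun k => ((3:Int), k, false))) ++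
    (["thread", "async", "lock", "race"].map (fun k => ((4:Int), k, false))) ++
    (["config", "env", "setting", "path"].map (fun k => ((5:Int), k, false))) ++
    (["slow", "performance", "timeout", "memory"].map (fun k => ((6:Int), k, false))) ++
    (["api", "database", "connection", "service"].map (fun k => ((7:Int), k, false))) := by
  rfl

theorem pvGrpF (dl fl : String) (kws : List String) (p m : Int) :
    List.foldl (pvStep dl fl) m (kws.map (fun k => (p, k, false))) =
      if kws.any (fun k => PySem.Str.isIn k dl) then min m p else m := by
  simpa using pvGrp dl fl kws p false m

theorem pvGrpT (dl fl : String) (kws : List String) (p m : Int) :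
    List.foldl (pvStep dl fl) m (kws.map (fun k => (p, k, true))) =
      if kws.any (fun k => PySem.Str.isIn k fl) then min m p else m := by
  simpa using pvGrp dl fl kws p true m

-- ===== VERDICT (by name: the statement is the Claim_ definition above) =====
set_option maxHeartbeats 4000000 in
theorem classify_bug_type_py_spec : Claim_equal_classify_bug_type_py := by
  intro description diff _
  unfold Spec_classify_bug_type_py classify_bug_type_py classify_bug_type_py_alt
  by_cases h0 : ((["->", "<=", ">=", "==", "!="].any fun p => PySem.Str.isIn p diff) &&
      (["boundary", "index", "range", "length"].any fun k =>
        PySem.Str.isIn k (PySem.Str.lower description))) = true <;>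
  by_cases h1 : (["null", "none", "undefined", "attributeerror"].any fun k =>
      PySem.Str.isIn k (PySem.Str.lower description)) = true <;>
  by_cases h2 : (["and", "or", "not", "if", "else"].any fun k =>
      PySem.Str.isIn k (PySem.Str.lower diff)) = true <;>
  by_cases h3 : (["exception", "error", "catch", "handle"].any fun k =>
      PySem.Str.isIn k (PySem.Str.lower description)) = true <;>
  by_cases h4 : (["thread", "async", "lock", "race"].any fun k =>
      PySem.Str.isIn k (PySem.Str.lower description)) = true <;>
  by_cases h5 : (["config", "env", "setting", "path"].any fun k =>
      PySem.Str.isIn k (PySem.Str.lower description)) = true <;>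
  by_cases h6 : (["slow", "performance", "timeout", "memory"].any fun k =>
      PySem.Str.isIn k (PySem.Str.lower description)) = true <;>
  by_cases h7 : (["api", "database", "connection", "service"].any fun k =>
      PySem.Str.isIn k (PySem.Str.lower description)) = true <;>
  simp only [pvFlat_eq, List.foldl_append, pvGrpF, pvGrpT, h0, h1, h2, h3, h4, h5, h6, h7,
    if_true, if_false, Bool.false_eq_true] <;>
  simp_all <;> rfl
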